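-- pv_equiv track=rewrite | github.com/Boffl/digital-musicology-webapps | dandrieu/programs/Dandrieu_rules.py | triplewise
-- ===== SOURCE A (Python) =====
-- def triplewise(iterable):
--     '''for iteration over triplets'''
--     it = iter(iterable)
--     a = next(it, None)
--     b = next(it, None)
--
--     for c in it:
--         yield (a, b, c)
--         a = b
--         b = c
-- ===== SOURCE B (Python) =====
-- from itertools import tee, islice
--
-- def triplewise(iterable):
--     '''for iteration over triplets'''
--     a, b, c = tee(iterable, 3)
--     next(b, None)
--     next(c, None)
--     next(c, None)
--     yield from zip(a, b, c)
-- ===== Notes on version B (the rewrite author's own statement) =====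
-- stated objective: idiomatic
-- what changed: Replaces the manual consume-two-then-rotate generator loop with three tee'd iterators offset by 0/1/2 and zipped in lockstep.
import Mathlib
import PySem

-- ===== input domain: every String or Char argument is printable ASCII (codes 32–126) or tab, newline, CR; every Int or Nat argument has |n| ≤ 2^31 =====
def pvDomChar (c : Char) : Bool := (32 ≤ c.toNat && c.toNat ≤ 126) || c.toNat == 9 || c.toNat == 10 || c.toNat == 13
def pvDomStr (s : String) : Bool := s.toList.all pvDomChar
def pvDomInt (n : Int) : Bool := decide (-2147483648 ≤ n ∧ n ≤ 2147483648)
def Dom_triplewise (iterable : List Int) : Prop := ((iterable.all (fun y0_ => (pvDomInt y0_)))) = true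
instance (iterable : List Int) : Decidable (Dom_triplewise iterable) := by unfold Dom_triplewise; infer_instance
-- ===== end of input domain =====

-- B replaces A's manual consume-two-then-rotate loop with three offset streams zipped in lockstep (idiomatic itertools style).


-- ===== PORT A =====
-- the 'for c in it' loop: state is the rotating pair (a, b)
def triplewiseLoop (a b : Int) : List Int → List (Int × Int × Int)
  | [] => []
  | c :: rest => (a, b, c) :: triplewiseLoop b c rest

-- a = next(it, None); b = next(it, None): if either is None the loop body never runs, so yield nothing
def triplewise (iterable : List Int) : List (Int × Int × Int) :=
  match iterable with
  | a :: b :: rest => triplewiseLoop a b rest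
  | _ => []

-- ===== PORT B =====
-- tee into three streams, skip 1 resp. 2 elements of the second/third (next(_, None) on an exhausted stream leaves it empty), zip
def triplewise_alt (iterable : List Int) : List (Int × Int × Int) :=
  iterable.zip ((iterable.drop 1).zip (iterable.drop 2))

-- ===== PRECONDITION & SPEC =====
def Spec_triplewise (iterable : List Int) (out : List (Int × Int × Int)) : Prop := out = triplewise_alt iterable
instance (iterable : List Int) (out : List (Int × Int × Int)) : Decidable (Spec_triplewise iterable out) := by unfold Spec_triplewise; infer_instance

-- ===== CLAIM (what is proved, stated in full; the proofs are below) =====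
def Claim_equal_triplewise : Prop := ∀ (iterable : List Int), Dom_triplewise iterable → Spec_triplewise iterable (triplewise iterable)

-- ===== LEMMAS AND PROOFS =====
theorem triplewiseLoop_eq_zip (l : List Int) : ∀ (a b : Int),
    triplewiseLoop a b l = (a :: b :: l).zip ((b :: l).zip l) := by
  induction l with
  | nil => intro a b; rfl
  | cons c rest ih =>
      intro a b
      simp [triplewiseLoop, List.zip, ih b c]

-- ===== VERDICT (by name: the statement is the Claim_ definition above) =====
theorem triplewise_spec : Claim_equal_triplewise := by
  intro iterable _
  unfold Spec_triplewise triplewise triplewise_alt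
  match iterable with
  | [] => rfl
  | [a] => rfl
  | a :: b :: rest => simp [triplewiseLoop_eq_zip]
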